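-- pv_equiv track=rewrite | github.com/sseongsukim/CodingTest | programmers/level2/79.py | solution
-- ===== SOURCE A (Python) =====
-- import heapq
--
-- def solution(n, k, enemy):
--     heap = []
--     for i, e in enumerate(enemy):
--         heapq.heappush(heap, e)
--         if len(heap) > k:
--             pop = heapq.heappop(heap)
--             n -= pop
--         if n < 0:
--             return i
--     return len(enemy)
-- ===== SOURCE B (Python) =====
-- import heapq
--
--
-- def solution(n, k, enemy):
--     for i in range(len(enemy)):
--         pre = enemy[:i + 1]
--         if sum(pre) - sum(heapq.nlargest(k, pre)) > n:
--             return i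
--     return len(enemy)
-- ===== Notes on version B (the rewrite author's own statement) =====
-- stated objective: simpler
-- what changed: A streams enemies through a min-heap while mutating a running budget; B is a stateless scan that, for each round index, recomputes the skip-adjusted damage of the whole prefix from scratch (sum minus heapq.nlargest(k, prefix)) and returns the first index whose damage exceeds n.
import Mathlib
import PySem

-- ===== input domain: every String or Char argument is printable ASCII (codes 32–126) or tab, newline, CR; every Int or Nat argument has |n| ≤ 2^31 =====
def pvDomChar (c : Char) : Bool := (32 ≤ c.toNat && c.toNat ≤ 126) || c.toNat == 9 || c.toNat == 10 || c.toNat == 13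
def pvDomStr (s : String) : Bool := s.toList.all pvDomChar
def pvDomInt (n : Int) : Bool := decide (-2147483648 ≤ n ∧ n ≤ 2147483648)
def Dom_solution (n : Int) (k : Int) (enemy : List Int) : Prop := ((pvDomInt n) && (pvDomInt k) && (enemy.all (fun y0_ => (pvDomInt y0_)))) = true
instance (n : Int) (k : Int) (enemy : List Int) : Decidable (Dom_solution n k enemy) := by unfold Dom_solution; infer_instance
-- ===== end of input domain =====

-- B replaces A's streaming min-heap and running budget with a stateless scan that
-- recomputes each prefix's skip-adjusted damage from scratch (simpler, not faster).

-- ===== PORT A =====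
-- heapq on Int modelled by its exact observable semantics: the heap as an ascending
-- sorted list, heappush = ordered insert, heappop = remove and return the minimum.
-- Exact here because for Int elements only the value multiset and popped minima are
-- observable. heappop is only reached on a nonempty heap (len > k ≥ 0 or len ≥ 1 > k),
-- so the headD default is unreachable.
def pyHeappush (heap : List Int) (e : Int) : List Int := List.orderedInsert (· ≤ ·) e heap

def pyHeappop (heap : List Int) : Int × List Int := (heap.headD 0, heap.tail)

def solGoA (k : Int) (total : Int) : Int → List Int → Int → List Int → Int
  | _n, _heap, _i, [] => total
  | n, heap, i, e :: rest =>
    let heap1 := pyHeappush heap e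
    let st := if (heap1.length : Int) > k then
                let p := pyHeappop heap1
                (n - p.1, p.2)
              else (n, heap1)
    if st.1 < 0 then i else solGoA k total st.1 st.2 (i + 1) rest

def solution (n : Int) (k : Int) (enemy : List Int) : Int :=
  solGoA k (enemy.length : Int) n [] 0 enemy

-- ===== PORT B =====
-- heapq.nlargest(k, xs) for Int: the k largest values in descending order.
def pyNLargest (k : Int) (xs : List Int) : List Int :=
  (PySem.List.sorted xs (fun x => x) true).take k.toNat

def altGo (n : Int) (k : Int) (enemy : List Int) : Nat → Nat → Int
  | _i, 0 => (enemy.length : Int)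
  | i, c + 1 =>
    let pre := enemy.take (i + 1)
    if pre.sum - (pyNLargest k pre).sum > n then (i : Int)
    else altGo n k enemy (i + 1) c

def solution_alt (n : Int) (k : Int) (enemy : List Int) : Int :=
  altGo n k enemy 0 enemy.length

-- ===== PRECONDITION & SPEC =====
def Spec_solution (n : Int) (k : Int) (enemy : List Int) (out : Int) : Prop := out = solution_alt n k enemy
instance (n : Int) (k : Int) (enemy : List Int) (out : Int) : Decidable (Spec_solution n k enemy out) := by unfold Spec_solution; infer_instance

-- ===== CLAIM (what is proved, stated in full; the proofs are below) =====
def Claim_equal_solution : Prop := ∀ (n : Int) (k : Int) (enemy : List Int), Dom_solution n k enemy → Spec_solution n k enemy (solution n k enemy)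

-- ===== LEMMAS AND PROOFS =====

def sA (p : List Int) : List Int := PySem.List.sorted p (fun x => x)

theorem orderedInsert_ne_nil (e : Int) (l : List Int) :
    List.orderedInsert (· ≤ ·) e l ≠ [] := by
  cases l with
  | nil => simp [List.orderedInsert]
  | cons b t => simp only [List.orderedInsert]; split <;> simp

theorem orderedInsert_eq_cons (e : Int) (l : List Int) (h : ∀ x ∈ l, e ≤ x) :
    List.orderedInsert (· ≤ ·) e l = e :: l := by
  cases l with
  | nil => rfl
  | cons b t =>
      simp only [List.orderedInsert]
      rw [if_pos]
      exact h b (by simp)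

theorem ins_sorted (p : List Int) (e : Int) :
    List.orderedInsert (· ≤ ·) e (sA p) = sA (p ++ [e]) := by
  unfold sA
  refine (PySem.List.sorted_id_eq_of_perm_of_pairwise _ _ ?_ ?_).symm
  · exact (List.perm_orderedInsert _ e _).trans
      (((PySem.List.sorted_perm p (fun x => x) false).cons e).trans
        (List.perm_append_singleton e p).symm)
  · exact List.Pairwise.orderedInsert e _ (PySem.List.sorted_pairwise p (fun x : Int => x))

theorem tail_ins_drop (e : Int) :
    ∀ (l : List Int) (m : Nat), List.Pairwise (· ≤ ·) l →
      (List.orderedInsert (· ≤ ·) e (l.drop m)).tail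
        = (List.orderedInsert (· ≤ ·) e l).drop (m + 1) := by
  intro l
  induction l with
  | nil => intro m _; simp [List.orderedInsert]
  | cons b t ih =>
      intro m hpw
      cases m with
      | zero =>
          simp only [List.drop_zero]
          rw [List.drop_one]
      | succ m =>
          have ht : List.Pairwise (· ≤ ·) t := hpw.of_cons
          have hbt : ∀ x ∈ t, b ≤ x := fun x hx => (List.pairwise_cons.mp hpw).1 x hx
          simp only [List.drop_succ_cons]
          rw [ih m ht]
          simp only [List.orderedInsert]
          split
          · rename_i hle
            have : List.orderedInsert (· ≤ ·) e t = e :: t :=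
              orderedInsert_eq_cons e t (fun x hx => le_trans hle (hbt x hx))
            rw [this]
            simp
          · simp

theorem sortD_eq_reverse (p : List Int) :
    PySem.List.sorted p (fun x : Int => x) true = (sA p).reverse := by
  have h : sA p = (PySem.List.sorted p (fun x : Int => x) true).reverse := by
    unfold sA
    refine PySem.List.sorted_id_eq_of_perm_of_pairwise (κ := Int) p _ ?_ ?_
    · exact (List.reverse_perm _).trans (PySem.List.sorted_perm p (fun x : Int => x) true)
    · exact List.pairwise_reverse.mpr (PySem.List.sorted_pairwise_rev p (fun x : Int => x))
  rw [h, List.reverse_reverse]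

theorem nlargest_sum (k : Int) (p : List Int) :
    (pyNLargest k p).sum = ((sA p).drop (p.length - k.toNat)).sum := by
  unfold pyNLargest
  rw [sortD_eq_reverse, List.take_reverse, List.sum_reverse]
  have : (sA p).length = p.length := by unfold sA; exact PySem.List.length_sorted _ _ _
  rw [this]

theorem headD_add_tail_sum (l : List Int) (h : l ≠ []) :
    l.headD 0 + l.tail.sum = l.sum := by
  cases l with
  | nil => exact absurd rfl h
  | cons a t => simp

theorem solGoA_eq_altGo (n0 k : Int) (enemy : List Int) :
    ∀ (rest pfx heap : List Int) (ncur : Int),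
      enemy = pfx ++ rest →
      heap = (sA pfx).drop (pfx.length - k.toNat) →
      ncur = n0 - (pfx.sum - heap.sum) →
      solGoA k (enemy.length : Int) ncur heap (pfx.length : Int) rest
        = altGo n0 k enemy pfx.length rest.length := by
  intro rest
  induction rest with
  | nil => intro pfx heap ncur _ _ _; simp [solGoA, altGo]
  | cons e rest' ih =>
      intro pfx heap ncur henemy hheap hncur
      have hslen : (sA pfx).length = pfx.length := by
        unfold sA; exact PySem.List.length_sorted _ _ _
      have hpre : enemy.take (pfx.length + 1) = pfx ++ [e] := by
        rw [henemy, List.take_append]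
        simp
      have hins : List.orderedInsert (· ≤ ·) e (sA pfx) = sA (pfx ++ [e]) :=
        ins_sorted pfx e
      have hs'len : (sA (pfx ++ [e])).length = pfx.length + 1 := by
        unfold sA; rw [PySem.List.length_sorted]; simp
      have hs'sum : (sA (pfx ++ [e])).sum = pfx.sum + e := by
        unfold sA
        rw [(PySem.List.sorted_perm (pfx ++ [e]) (fun x : Int => x) false).sum_eq]
        simp
      have hssum : (sA pfx).sum = pfx.sum := by
        unfold sA; exact (PySem.List.sorted_perm pfx (fun x : Int => x) false).sum_eq
      have hnl : (pyNLargest k (pfx ++ [e])).sum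
          = ((sA (pfx ++ [e])).drop ((pfx.length + 1) - k.toNat)).sum := by
        rw [nlargest_sum]; simp
      by_cases hcase : pfx.length < k.toNat
      -- no-pop case: the heap is the whole sorted prefix
      · have hm : pfx.length - k.toNat = 0 := by omega
        have hheap' : heap = sA pfx := by rw [hheap, hm, List.drop_zero]
        have hn0 : ncur = n0 := by rw [hncur, hheap', hssum]; ring
        have hk : 1 ≤ k.toNat := by omega
        have hkk : (k.toNat : Int) = k := by omega
        have hlen1 : (List.orderedInsert (· ≤ ·) e heap).length = pfx.length + 1 := by
          rw [hheap', hins, hs'len]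
        have hcond : ¬ ((List.orderedInsert (· ≤ ·) e heap).length : Int) > k := by
          rw [hlen1, ← hkk]; push_cast; omega
        have hm' : (pfx.length + 1) - k.toNat = 0 := by omega
        have hbcond : (pfx ++ [e]).sum - (pyNLargest k (pfx ++ [e])).sum
            = n0 - ncur := by
          rw [hnl, hm', List.drop_zero, hs'sum, hn0]
          simp only [List.sum_append, List.sum_cons, List.sum_nil]
          ring
        show solGoA k (enemy.length : Int) ncur heap (pfx.length : Int) (e :: rest')
            = altGo n0 k enemy pfx.length (e :: rest').length
        rw [solGoA, List.length_cons, altGo]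
        simp only [pyHeappush, hcond, if_false, hpre, hbcond]
        by_cases hret : ncur < 0
        · rw [if_pos hret, if_pos (by omega)]
        · rw [if_neg hret, if_neg (by omega)]
          have := ih (pfx ++ [e]) (List.orderedInsert (· ≤ ·) e heap) ncur
            (by rw [henemy]; simp)
            (by rw [hheap', hins]; simp [hm'])
            (by
              rw [hheap', hins, hs'sum, hn0]
              simp only [List.sum_append, List.sum_cons, List.sum_nil]
              ring)
          simpa [add_comm] using this
      -- pop case: the heap holds the k largest of the prefix
      · have hkj : k.toNat ≤ pfx.length := by omega
        have hlenh : heap.length = k.toNat := by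
          rw [hheap, List.length_drop, hslen]; omega
        have hlen1 : (List.orderedInsert (· ≤ ·) e heap).length = k.toNat + 1 := by
          rw [(List.perm_orderedInsert _ e heap).length_eq, List.length_cons, hlenh]
        have hcond : ((List.orderedInsert (· ≤ ·) e heap).length : Int) > k := by
          rw [hlen1]; push_cast; omega
        have hne : List.orderedInsert (· ≤ ·) e heap ≠ [] := orderedInsert_ne_nil e heap
        have htail : (List.orderedInsert (· ≤ ·) e heap).tail
            = (sA (pfx ++ [e])).drop ((pfx.length + 1) - k.toNat) := by
          have hpw : List.Pairwise (· ≤ ·) (sA pfx) := PySem.List.sorted_pairwise pfx (fun x : Int => x)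
          rw [hheap, tail_ins_drop e (sA pfx) _ hpw, hins]
          congr 1
          omega
        have hsum1 : (List.orderedInsert (· ≤ ·) e heap).sum = e + heap.sum :=
          (List.perm_orderedInsert _ e heap).sum_eq
        have hhead : (List.orderedInsert (· ≤ ·) e heap).headD 0
            = e + heap.sum - ((sA (pfx ++ [e])).drop ((pfx.length + 1) - k.toNat)).sum := by
          have := headD_add_tail_sum _ hne
          rw [htail, hsum1] at this
          omega
        have hbcond : (pfx ++ [e]).sum - (pyNLargest k (pfx ++ [e])).sum
            = n0 - (ncur - (List.orderedInsert (· ≤ ·) e heap).headD 0) := by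
          rw [hnl, hhead, hncur]
          simp only [List.sum_append, List.sum_cons, List.sum_nil]
          ring
        show solGoA k (enemy.length : Int) ncur heap (pfx.length : Int) (e :: rest')
            = altGo n0 k enemy pfx.length (e :: rest').length
        rw [solGoA, List.length_cons, altGo]
        simp only [pyHeappush, pyHeappop, hcond, if_true, hpre, hbcond]
        by_cases hret : ncur - (List.orderedInsert (· ≤ ·) e heap).headD 0 < 0
        · rw [if_pos hret, if_pos (by omega)]
        · rw [if_neg hret, if_neg (by omega)]
          have := ih (pfx ++ [e]) ((List.orderedInsert (· ≤ ·) e heap).tail)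
            (ncur - (List.orderedInsert (· ≤ ·) e heap).headD 0)
            (by rw [henemy]; simp)
            (by rw [htail]; simp)
            (by
              rw [htail, hhead, hncur]
              simp only [List.sum_append, List.sum_cons, List.sum_nil]
              ring)
          simpa [add_comm] using this

-- ===== VERDICT (by name: the statement is the Claim_ definition above) =====
theorem solution_spec : Claim_equal_solution := by
  intro n k enemy _
  show solution n k enemy = solution_alt n k enemy
  unfold solution solution_alt
  have hnil : sA ([] : List Int) = [] := by
    have := PySem.List.sorted_perm ([] : List Int) (fun x : Int => x) false
    unfold sA
    simpa using this.eq_nil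
  have := solGoA_eq_altGo n k enemy enemy [] [] n rfl (by rw [hnil]; simp) (by simp)
  simpa using this
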